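-- pv_equiv track=rewrite | github.com/pypi-data/pypi-mirror-401 | packages/stanlogic/stanlogic-2.1.0-py3-none-any.whl/stanlogic/BoolMinGeo.py | _pattern_to_identifier_set
-- ===== SOURCE A (Python) =====
-- def _pattern_to_identifier_set(pattern):
--     """
--     Convert an identifier pattern with don't cares to the set of
--     concrete identifiers it represents.
--
--     Args:
--         pattern: String with possible '-' (e.g., "0-1")
--
--     Returns:
--         set: Set of concrete binary strings
--     """
--     # Count don't cares
--     n_dontcares = pattern.count('-')
--
--     if n_dontcares == 0:
--         return {pattern}
--
--     # Generate all combinations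
--     result = set()
--     for i in range(2 ** n_dontcares):
--         concrete = list(pattern)
--         bits = format(i, f'0{n_dontcares}b')
--         bit_idx = 0
--
--         for j in range(len(concrete)):
--             if concrete[j] == '-':
--                 concrete[j] = bits[bit_idx]
--                 bit_idx += 1
--
--         result.add(''.join(concrete))
--
--     return result
-- ===== SOURCE B (Python) =====
-- def _pattern_to_identifier_set(pattern):
--     """Split on the first don't care: expand it to '0' and '1' and prefix
--     the part before it to every expansion of the part after it."""
--     i = pattern.find('-')
--     if i == -1:
--         return {pattern}
--     pre, suf = pattern[:i], pattern[i + 1:]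
--     return {pre + b + rest for b in '01' for rest in _pattern_to_identifier_set(suf)}
-- ===== Notes on version B (the rewrite author's own statement) =====
-- stated objective: alternative
-- what changed: Replaces the enumeration of all 2^k integers with binary formatting and positional fill by a structural recursion on the pattern that expands the first character and prefixes it to the expansions of the rest.
import Mathlib
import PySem

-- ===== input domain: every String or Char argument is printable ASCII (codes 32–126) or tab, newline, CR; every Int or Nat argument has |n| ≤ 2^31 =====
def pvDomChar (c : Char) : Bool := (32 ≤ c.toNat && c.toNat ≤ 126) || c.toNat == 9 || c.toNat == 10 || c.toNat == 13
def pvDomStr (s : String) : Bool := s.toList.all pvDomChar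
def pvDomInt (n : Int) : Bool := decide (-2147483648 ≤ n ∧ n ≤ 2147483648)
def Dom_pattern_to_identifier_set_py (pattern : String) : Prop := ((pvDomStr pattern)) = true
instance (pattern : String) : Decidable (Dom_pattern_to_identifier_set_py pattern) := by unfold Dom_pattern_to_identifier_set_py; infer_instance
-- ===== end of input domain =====

-- B is an alternative of the same cost: structural recursion on the pattern instead of
-- enumerating 2^k integers and formatting each as a padded bit string.

-- ===== PORT A =====
-- Port of A (`_pattern_to_identifier_set`), step for step.
-- `format(i, f'0{n}b')` (no PySem primitive for the padded form) is ported as the prelude's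
-- `format(i,'b')` (`PySem.Int.toBinChars`) zero-padded by `PySem.Chars.zfill`, which is exact here
-- since `i ≥ 0`.  `bits[bit_idx]` and `concrete[j]` are always in range, so the `pyGetD`
-- defaults are unreachable; `''.join(concrete)` of single chars is `String.ofList`.
def pattern_to_identifier_set_py (pattern : String) : List String :=
  let n := PySem.Str.count pattern "-"
  if n == 0 then PySem.Set.ofList [pattern]
  else
    (PySem.List.pyRange 0 ((2 : Int) ^ n) 1).foldl
      (fun result i =>
        let concrete := pattern.toList
        let bits := PySem.Chars.zfill (PySem.Int.toBinChars i) (n : Int)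
        let st := (PySem.List.pyRange 0 (concrete.length : Int) 1).foldl
          (fun (st : List Char × Nat) j =>
            if PySem.List.pyGetD st.1 j ' ' == '-' then
              (st.1.set j.toNat (PySem.List.pyGetD bits (st.2 : Int) ' '), st.2 + 1)
            else st)
          (concrete, 0)
        PySem.Set.add result (String.ofList st.1))
      PySem.Set.empty

-- ===== PORT B =====
-- Port of B (Source B); strings are handled as their char lists, `pattern.find('-')` is
-- `PySem.Chars.find`, the slices `pattern[:i]` / `pattern[i+1:]` are `PySem.List.slice`,
-- `pre + b + rest` is `pre ++ b :: rest`, and the set comprehension is `PySem.Set.ofList`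
-- of the generated list.
def pvExpand (l : List Char) : List (List Char) :=
  let i := PySem.Chars.find l ['-']
  if hi : i = -1 then [l]
  else
    let pre := PySem.List.slice l none (some i)
    let suf := PySem.List.slice l (some (i + 1)) none
    PySem.Set.ofList ((['0', '1']).flatMap (fun b => (pvExpand suf).map (fun rest => pre ++ b :: rest)))
termination_by l.length
decreasing_by
  have h0 : (0 : Int) ≤ PySem.Chars.find l ['-'] := by
    have := PySem.Chars.neg_one_le_find l ['-']
    omega
  have hlt : (PySem.Chars.find l ['-']).toNat < l.length := by
    have hpre := (PySem.Chars.find_spec h0).1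
    have hd : l.drop (PySem.Chars.find l ['-']).toNat ≠ [] := by
      intro hnil
      rw [hnil] at hpre
      exact absurd (List.prefix_nil.mp hpre) (by simp)
    have hlen : 0 < (l.drop (PySem.Chars.find l ['-']).toNat).length :=
      List.length_pos_of_ne_nil hd
    simp only [List.length_drop] at hlen
    omega
  rw [PySem.List.slice_from l (by omega)]
  simp only [List.length_drop]
  omega

def pattern_to_identifier_set_py_alt (pattern : String) : List String :=
  (pvExpand pattern.toList).map String.ofList

-- ===== PRECONDITION & SPEC =====
def Spec_pattern_to_identifier_set_py (pattern : String) (out : List String) : Prop := out = pattern_to_identifier_set_py_alt pattern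
instance (pattern : String) (out : List String) : Decidable (Spec_pattern_to_identifier_set_py pattern out) := by unfold Spec_pattern_to_identifier_set_py; infer_instance

-- ===== CLAIM (what is proved, stated in full; the proofs are below) =====
def Claim_equal_pattern_to_identifier_set_py : Prop := ∀ (pattern : String), Dom_pattern_to_identifier_set_py pattern → Spec_pattern_to_identifier_set_py pattern (pattern_to_identifier_set_py pattern)

-- ===== LEMMAS AND PROOFS =====

lemma count_go_single (c : Char) : ∀ (fuel : Nat) (l : List Char) (acc : Nat),
    l.length ≤ fuel → PySem.Chars.count.go [c] fuel l acc = acc + l.count c := by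
  intro fuel
  induction fuel with
  | zero => intro l acc h; interval_cases hl : l.length
            · simp [List.length_eq_zero_iff.mp hl, PySem.Chars.count.go]
  | succ f ih =>
    intro l acc h
    cases l with
    | nil => simp [PySem.Chars.count.go]
    | cons x t =>
      by_cases hx : x = c
      · simp only [PySem.Chars.count.go, List.isPrefixOf, hx]
        simp [ih t (acc + 1) (by simpa using h)]
        omega
      · simp only [PySem.Chars.count.go, List.isPrefixOf]
        simp [hx, ih t acc (by simpa using h), Ne.symm hx]
lemma str_count_single (s : String) (c : Char) :
    PySem.Str.count s (String.ofList [c]) = s.toList.count c := by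
  rw [PySem.Str.count_eq]
  simp only [PySem.Chars.count]
  rw [show (String.ofList [c]).toList = [c] by simp]
  rw [count_go_single c s.toList.length s.toList 0 le_rfl]
  simp

-- recursive characterisation of A's inner fill loop
def pvFill : List Char → List Char → List Char
  | [], _ => []
  | c :: cs, bits => if c = '-' then bits.headD ' ' :: pvFill cs bits.tail else c :: pvFill cs bits

lemma pvFill_no_dash (l : List Char) (bits : List Char) (h : l.count '-' = 0) :
    pvFill l bits = l := by
  induction l generalizing bits with
  | nil => rfl
  | cons c cs ih =>
    have hc : ¬ c = '-' := by
      intro hc; subst hc; simp at h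
    have : cs.count '-' = 0 := by
      simp [List.count_cons] at h; omega
    simp [pvFill, hc, ih _ this]

lemma inner_loop (bits : List Char) : ∀ (rest done : List Char) (bi : Nat),
    (PySem.List.pyRange (done.length : Int) ((done.length + rest.length : Nat) : Int) 1).foldl
      (fun (st : List Char × Nat) j =>
        if PySem.List.pyGetD st.1 j ' ' == '-' then
          (st.1.set j.toNat (PySem.List.pyGetD bits (st.2 : Int) ' '), st.2 + 1)
        else st)
      (done ++ rest, bi)
    = (done ++ pvFill rest (bits.drop bi), bi + rest.count '-') := by
  intro rest
  induction rest with
  | nil =>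
    intro done bi
    have h0 : PySem.List.pyRange (done.length : Int) ((done.length + 0 : Nat) : Int) 1 = [] := by
      simp [PySem.List.pyRange]
    simp only [List.length_nil, h0, List.foldl_nil, pvFill]
    simp
  | cons c cs ih =>
    intro done bi
    have hlt : (done.length : Int) < ((done.length + (c :: cs).length : Nat) : Int) := by
      simp
    rw [PySem.List.pyRange_one_cons hlt]
    simp only [List.foldl_cons]
    have hget : PySem.List.pyGetD (done ++ c :: cs) (done.length : Int) ' ' = c := by
      rw [PySem.List.pyGetD_natCast]
      simp [List.getD_eq_getElem?_getD]
    rw [hget]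
    have hstop : ((done.length + (c :: cs).length : Nat) : Int)
        = (((done ++ [c]).length + cs.length : Nat) : Int) := by push_cast; simp; ring
    by_cases hc : c = '-'
    · subst hc
      have hb : PySem.List.pyGetD bits (bi : Int) ' ' = (bits.drop bi).headD ' ' := by
        rw [PySem.List.pyGetD_natCast]
        simp [List.getD_eq_getElem?_getD, List.headD_eq_head?_getD, List.head?_drop]
      simp only [beq_self_eq_true, if_true, Int.toNat_natCast, hb]
      have hset : (done ++ '-' :: cs).set done.length ((bits.drop bi).headD ' ')
          = (done ++ [(bits.drop bi).headD ' ']) ++ cs := by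
        rw [List.set_append]
        simp
      rw [hset]
      set b := (bits.drop bi).headD ' ' with hbdef
      have hstep : (done.length : Int) + 1 = (((done ++ [b]).length : Nat) : Int) := by
        simp
      have hstop' : ((done.length + (cs.length + 1) : Nat) : Int)
          = (((done ++ [b]).length + cs.length : Nat) : Int) := by push_cast; simp; ring
      simp only [List.length_cons] at *
      rw [hstep, hstop', ih (done ++ [b]) (bi + 1)]
      simp only [pvFill, List.count_cons, List.append_assoc, List.cons_append, List.nil_append]
      refine Prod.ext ?_ ?_
      · simp [hbdef, List.tail_drop, List.headD_eq_head?_getD, List.head?_drop]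
      · simp; omega
    · have hcb : (c == '-') = false := by simpa using hc
      simp only [hcb, Bool.false_eq_true, if_false]
      have hstep : (done.length : Int) + 1 = (((done ++ [c]).length : Nat) : Int) := by
        simp
      have hrw : done ++ c :: cs = (done ++ [c]) ++ cs := by simp
      rw [hstop, hstep, hrw, ih (done ++ [c]) bi]
      simp [pvFill, hc]

lemma tdc_fuel : ∀ (f f' n : Nat) (acc : List Char), n < f → n < f' →
    Nat.toDigitsCore 2 f n acc = Nat.toDigitsCore 2 f' n acc := by
  intro f
  induction f with
  | zero => intro f' n acc h; omega
  | succ f ih =>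
    intro f' n acc h h'
    cases f' with
    | zero => omega
    | succ f' =>
      simp only [Nat.toDigitsCore]
      by_cases h0 : n / 2 = 0
      · simp [h0]
      · simp only [h0, if_false]
        exact ih f' (n / 2) _ (by omega) (by omega)

lemma tdc_shift : ∀ (f n : Nat) (acc : List Char), n < f →
    Nat.toDigitsCore 2 f n acc = Nat.toDigitsCore 2 f n [] ++ acc := by
  intro f
  induction f with
  | zero => intro n acc h; omega
  | succ f ih =>
    intro n acc h
    simp only [Nat.toDigitsCore]
    by_cases h0 : n / 2 = 0
    · simp [h0]
    · simp only [h0, if_false]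
      rw [ih (n / 2) _ (by omega), ih (n / 2) [(n % 2).digitChar] (by omega)]
      simp

lemma toDigits_two_step (n : Nat) (h : 2 ≤ n) :
    Nat.toDigits 2 n = Nat.toDigits 2 (n / 2) ++ [Nat.digitChar (n % 2)] := by
  show Nat.toDigitsCore 2 (n + 1) n [] = _
  simp only [Nat.toDigitsCore]
  have h0 : ¬ n / 2 = 0 := by omega
  simp only [h0, if_false]
  rw [tdc_shift n (n / 2) _ (by omega), tdc_fuel n (n / 2 + 1) (n / 2) [] (by omega) (by omega)]
  rfl

lemma toDigits_two_head (n : Nat) : ∃ c rest, Nat.toDigits 2 n = c :: rest ∧ (c = '0' ∨ c = '1') := by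
  induction n using Nat.strong_induction_on with
  | _ n ih =>
    rcases Nat.lt_or_ge n 2 with h2 | h2
    · interval_cases n
      · exact ⟨'0', [], by decide, Or.inl rfl⟩
      · exact ⟨'1', [], by decide, Or.inr rfl⟩
    · obtain ⟨c, rest, hcr, hc⟩ := ih (n / 2) (by omega)
      exact ⟨c, rest ++ [Nat.digitChar (n % 2)],
        by rw [toDigits_two_step n h2, hcr]; simp, hc⟩

def pvBitsRaw (d i : Nat) : List Char :=
  List.replicate (d - (Nat.toDigits 2 i).length) '0' ++ Nat.toDigits 2 i

lemma zfill_toBinChars (d i : Nat) :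
    PySem.Chars.zfill (PySem.Int.toBinChars (i : Int)) (d : Int) = pvBitsRaw d i := by
  obtain ⟨c, rest, hcr, hc⟩ := toDigits_two_head i
  have htb : PySem.Int.toBinChars (i : Int) = Nat.toDigits 2 i := by
    simp [PySem.Int.toBinChars]
  rw [htb, PySem.Chars.zfill.eq_def, pvBitsRaw]
  by_cases hle : (d : Int) ≤ ((Nat.toDigits 2 i).length : Int)
  · rw [if_pos hle]
    have : d - (Nat.toDigits 2 i).length = 0 := by omega
    simp [this]
  · rw [if_neg hle, hcr]
    have hnc : ¬ (c = '+' ∨ c = '-') := by rcases hc with rfl | rfl <;> decide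
    simp only [hnc, if_false]
    simp

lemma pvBitsRaw_step (d i : Nat) (hd : 1 ≤ d) :
    pvBitsRaw (d + 1) i = pvBitsRaw d (i / 2) ++ [Nat.digitChar (i % 2)] := by
  rcases Nat.lt_or_ge i 2 with h2 | h2
  · have h0 : i / 2 = 0 := by omega
    rw [h0]
    interval_cases i
    · show List.replicate (d + 1 - 1) '0' ++ ['0'] = (List.replicate (d - 1) '0' ++ ['0']) ++ [Nat.digitChar 0]
      rw [show d + 1 - 1 = (d - 1) + 1 by omega, List.replicate_succ' (n := d - 1)]
      simp [Nat.digitChar]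
    · show List.replicate (d + 1 - 1) '0' ++ ['1'] = (List.replicate (d - 1) '0' ++ ['0']) ++ [Nat.digitChar 1]
      rw [show d + 1 - 1 = (d - 1) + 1 by omega, List.replicate_succ' (n := d - 1)]
      simp [Nat.digitChar]
  · rw [pvBitsRaw, pvBitsRaw, toDigits_two_step i h2]
    have hne : Nat.toDigits 2 (i / 2) ≠ [] := by
      obtain ⟨c, rest, hcr, _⟩ := toDigits_two_head (i / 2); simp [hcr]
    simp only [List.length_append, List.length_singleton]
    rw [show d + 1 - ((Nat.toDigits 2 (i / 2)).length + 1) = d - (Nat.toDigits 2 (i / 2)).length by omega]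
    simp

lemma pvBitsRaw_low (d i : Nat) (hd : 1 ≤ d) (hi : i < 2 ^ d) :
    pvBitsRaw (d + 1) i = '0' :: pvBitsRaw d i := by
  have hlen := Nat.toDigits_length 2 i d hd hi
  rw [pvBitsRaw, pvBitsRaw, show d + 1 - (Nat.toDigits 2 i).length = (d - (Nat.toDigits 2 i).length) + 1 by omega,
    List.replicate_succ]
  simp

lemma pvBitsRaw_high (d : Nat) (hd : 1 ≤ d) : ∀ i, i < 2 ^ d →
    pvBitsRaw (d + 1) (2 ^ d + i) = '1' :: pvBitsRaw d i := by
  induction d with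
  | zero => omega
  | succ d ih =>
    intro i hi
    rcases Nat.eq_or_lt_of_le hd with hd1 | hd1
    · -- d + 1 = 1, i.e. d = 0
      have hd0 : d = 0 := by omega
      subst hd0
      interval_cases i <;> decide
    · have hdge : 1 ≤ d := by omega
      rw [pvBitsRaw_step (d + 1) (2 ^ (d + 1) + i) (by omega)]
      have hdiv : (2 ^ (d + 1) + i) / 2 = 2 ^ d + i / 2 := by
        rw [pow_succ]
        omega
      have hmod : (2 ^ (d + 1) + i) % 2 = i % 2 := by
        rw [pow_succ]
        omega
      rw [hdiv, hmod, ih hdge (i / 2) (by rw [pow_succ] at hi; omega)]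
      rw [pvBitsRaw_step d i hdge]
      simp

def allBits : Nat → List (List Char)
  | 0 => [[]]
  | d + 1 => (allBits d).map ('0' :: ·) ++ (allBits d).map ('1' :: ·)

lemma range_map_pvBitsRaw : ∀ (d : Nat), 1 ≤ d →
    (List.range (2 ^ d)).map (pvBitsRaw d) = allBits d := by
  intro d
  induction d with
  | zero => omega
  | succ d ih =>
    intro _
    rcases Nat.eq_zero_or_pos d with rfl | hd
    · decide
    · have hsplit : List.range (2 ^ (d + 1)) = List.range (2 ^ d) ++ (List.range (2 ^ d)).map (2 ^ d + ·) := by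
        rw [show 2 ^ (d + 1) = 2 ^ d + 2 ^ d by ring, List.range_add]
      rw [hsplit, List.map_append, List.map_map]
      show _ ++ (List.range (2 ^ d)).map (fun i => pvBitsRaw (d + 1) (2 ^ d + i)) = _
      rw [allBits]
      congr 1
      · rw [← ih hd, List.map_map]
        refine List.map_congr_left ?_
        intro i hi
        exact pvBitsRaw_low d i hd (List.mem_range.mp hi)
      · rw [← ih hd, List.map_map]
        refine List.map_congr_left ?_
        intro i hi
        exact pvBitsRaw_high d hd i (List.mem_range.mp hi)


lemma pvExpand_nodup (l : List Char) : (pvExpand l).Nodup := by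
  rw [pvExpand]
  split
  · exact List.nodup_singleton l
  · exact PySem.Set.nodup_ofList _

-- decomposition of a pattern at its first dash
lemma find_decompose (l : List Char) (h : ¬ PySem.Chars.find l ['-'] = -1) :
    let i := (PySem.Chars.find l ['-']).toNat
    i < l.length ∧ l = l.take i ++ '-' :: l.drop (i + 1) ∧ (l.take i).count '-' = 0 := by
  have h0 : (0 : Int) ≤ PySem.Chars.find l ['-'] := by
    have := PySem.Chars.neg_one_le_find l ['-']
    omega
  obtain ⟨hpre, hmin⟩ := PySem.Chars.find_spec h0
  set i := (PySem.Chars.find l ['-']).toNat with hi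
  have hlt : i < l.length := by
    have hd : l.drop i ≠ [] := by
      intro hnil
      rw [hnil] at hpre
      exact absurd (List.prefix_nil.mp hpre) (by simp)
    have hlen : 0 < (l.drop i).length := List.length_pos_of_ne_nil hd
    simp only [List.length_drop] at hlen
    omega
  obtain ⟨t, ht⟩ := hpre
  have hdi : List.drop i l = '-' :: t := by rw [← ht]; simp
  have ht1 : List.drop (i + 1) l = t := by
    rw [← List.tail_drop, hdi]
    rfl
  refine ⟨hlt, ?_, ?_⟩
  · conv_lhs => rw [← List.take_append_drop i l]
    rw [hdi, ht1]
  · by_contra hcnt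
    have hmem : '-' ∈ l.take i := List.count_pos_iff.mp (by omega)
    obtain ⟨j, hj, hjel⟩ := List.mem_iff_getElem.mp hmem
    have hjlt : j < i := by
      simpa using (List.length_take_le i l).trans_lt' hj
    have hjl : j < l.length := by omega
    have hlj : l[j]'hjl = '-' := by
      rw [List.getElem_take] at hjel
      exact hjel
    refine hmin j hjlt ⟨l.drop (j + 1), ?_⟩
    rw [List.singleton_append, ← hlj]
    exact List.getElem_cons_drop hjl

lemma append_cons_nodup {T : List (List Char)} (hT : T.Nodup) (pre : List Char) (a b : Char)
    (hab : a ≠ b) :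
    ((T.map (fun t => pre ++ a :: t)) ++ (T.map (fun t => pre ++ b :: t))).Nodup := by
  have hinj : ∀ c : Char, Function.Injective (fun t : List Char => pre ++ c :: t) := by
    intro c x y hxy
    simpa using hxy
  refine List.Nodup.append (hT.map (hinj a)) (hT.map (hinj b)) ?_
  intro x hx hy
  simp only [List.mem_map] at hx hy
  obtain ⟨u, _, rfl⟩ := hx
  obtain ⟨v, _, hv⟩ := hy
  have := List.append_cancel_left hv
  simp only [List.cons.injEq] at this
  exact hab this.1.symm

lemma pvFill_split (pre : List Char) : ∀ (suf bits : List Char) (b : Char),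
    pre.count '-' = 0 →
    pvFill (pre ++ '-' :: suf) (b :: bits) = pre ++ b :: pvFill suf bits := by
  induction pre with
  | nil => intro suf bits b _; simp [pvFill]
  | cons c cs ih =>
    intro suf bits b h
    have hc : ¬ c = '-' := by
      intro hc; subst hc; simp at h
    have hcs : cs.count '-' = 0 := by
      simp [hc] at h
      omega
    simp only [List.cons_append, pvFill, if_neg hc]
    rw [ih suf bits b hcs]

lemma pvExpand_eq_allBits (l : List Char) :
    pvExpand l = (allBits (l.count '-')).map (fun bs => pvFill l bs) := by
  suffices H : ∀ (n : Nat) (l : List Char), l.length = n →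
      pvExpand l = (allBits (l.count '-')).map (fun bs => pvFill l bs) from H l.length l rfl
  intro n
  induction n using Nat.strong_induction_on with
  | _ n ih =>
    intro l rfl
    rw [pvExpand]
    by_cases hfind : PySem.Chars.find l ['-'] = -1
    · rw [dif_pos hfind]
      have hnin : ¬ ('-' ∈ l) := by
        intro hmem
        have hinf : ['-'] <:+: l := by
          obtain ⟨p, q, rfl⟩ := List.mem_iff_append.mp hmem
          exact ⟨p, q, by simp⟩
        have := (PySem.Chars.find_nonneg_iff l ['-']).mpr hinf
        omega
      have h0 : l.count '-' = 0 := List.count_eq_zero.mpr hnin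
      rw [h0, show allBits 0 = [[]] from rfl]
      simp only [List.map_cons, List.map_nil]
      rw [pvFill_no_dash l [] h0]
    · rw [dif_neg hfind]
      have h0 : (0 : Int) ≤ PySem.Chars.find l ['-'] := by
        have := PySem.Chars.neg_one_le_find l ['-']
        omega
      obtain ⟨hlt, hdec, hpre0⟩ := find_decompose l hfind
      set i := (PySem.Chars.find l ['-']).toNat with hidef
      set pre := l.take i with hpredef
      set suf := l.drop (i + 1) with hsufdef
      have hslice_to : PySem.List.slice l none (some (PySem.Chars.find l ['-'])) = pre :=
        PySem.List.slice_to l h0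
      have hslice_from : PySem.List.slice l (some (PySem.Chars.find l ['-'] + 1)) none = suf := by
        rw [PySem.List.slice_from l (by omega)]
        congr 1
        omega
      show PySem.Set.ofList ((['0', '1']).flatMap (fun b =>
          (pvExpand (PySem.List.slice l (some (PySem.Chars.find l ['-'] + 1)) none)).map
            (fun rest => PySem.List.slice l none (some (PySem.Chars.find l ['-'])) ++ b :: rest)))
        = (allBits (l.count '-')).map (fun bs => pvFill l bs)
      rw [hslice_to, hslice_from]
      have hsuflen : suf.length < l.length := by
        rw [hsufdef]
        simp only [List.length_drop]
        omega
      have hcount : l.count '-' = suf.count '-' + 1 := by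
        conv_lhs => rw [hdec]
        simp [List.count_append, hpre0]
      have hIH := ih suf.length hsuflen suf rfl
      have hflat : (['0', '1']).flatMap (fun b => (pvExpand suf).map (fun rest => pre ++ b :: rest))
          = (pvExpand suf).map (fun t => pre ++ '0' :: t) ++ (pvExpand suf).map (fun t => pre ++ '1' :: t) := by
        simp
      rw [hflat, PySem.Set.ofList_eq_self_of_nodup _
        (append_cons_nodup (pvExpand_nodup suf) pre '0' '1' (by decide))]
      rw [hcount, allBits, List.map_append, List.map_map, List.map_map, hIH, List.map_map, List.map_map]
      congr 1 <;> refine List.map_congr_left (fun bs _ => ?_) <;>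
        simp only [Function.comp_apply] <;>
        (conv_rhs => rw [hdec]) <;>
        rw [pvFill_split pre suf bs _ hpre0]

lemma ofList_injective : Function.Injective String.ofList := by
  intro a b h
  simpa using congrArg String.toList h

-- ===== VERDICT (by name: the statement is the Claim_ definition above) =====
theorem pattern_to_identifier_set_py_spec : Claim_equal_pattern_to_identifier_set_py := by
  intro pattern _
  unfold Spec_pattern_to_identifier_set_py pattern_to_identifier_set_py pattern_to_identifier_set_py_alt
  set l := pattern.toList with hl
  have hcnt : PySem.Str.count pattern "-" = l.count '-' := by
    rw [show ("-" : String) = String.ofList ['-'] from rfl]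
    exact str_count_single pattern '-'
  rw [hcnt]
  by_cases h0 : l.count '-' = 0
  · simp only [h0, beq_self_eq_true, if_true]
    rw [pvExpand_eq_allBits l, h0, show allBits 0 = [[]] from rfl,
      PySem.Set.ofList_eq_self_of_nodup _ (List.nodup_singleton pattern)]
    simp only [List.map_cons, List.map_nil]
    rw [show pvFill l [] = l from pvFill_no_dash _ _ h0]
    simp [hl]
  · have hn1 : 1 ≤ l.count '-' := by omega
    have hne : (l.count '-' == 0) = false := by simpa using h0
    simp only [hne, Bool.false_eq_true, if_false]
    set n := l.count '-' with hn
    -- the outer loop builds the set of all filled strings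
    have hpow : ((2 : Int) ^ n) = ((2 ^ n : Nat) : Int) := by push_cast; ring
    rw [hpow, PySem.List.pyRange_zero_natCast (2 ^ n)]
    rw [← PySem.Set.update_map_eq_foldl_add, PySem.Set.update_empty]
    rw [List.map_map]
    have hg : ∀ k : Nat, k ∈ List.range (2 ^ n) →
        ((fun i : Int => String.ofList
          ((PySem.List.pyRange 0 (l.length : Int) 1).foldl
            (fun (st : List Char × Nat) j =>
              if PySem.List.pyGetD st.1 j ' ' == '-' then
                (st.1.set j.toNat (PySem.List.pyGetD (PySem.Chars.zfill (PySem.Int.toBinChars i) (n : Int)) (st.2 : Int) ' '), st.2 + 1)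
              else st)
            (l, 0)).1) ∘ (fun k : Nat => (k : Int))) k
        = (String.ofList ∘ (fun bs => pvFill l bs)) (pvBitsRaw n k) := by
      intro k _
      simp only [Function.comp]
      congr 1
      have := inner_loop (PySem.Chars.zfill (PySem.Int.toBinChars (k : Int)) (n : Int)) l [] 0
      simp only [List.nil_append, List.length_nil, Nat.zero_add, List.drop_zero,
        Nat.cast_zero] at this
      rw [this, zfill_toBinChars n k]
    rw [List.map_congr_left hg,
      show (fun a => (String.ofList ∘ fun bs => pvFill l bs) (pvBitsRaw n a))
        = ((String.ofList ∘ fun bs => pvFill l bs) ∘ pvBitsRaw n) from rfl,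
      ← List.map_map, range_map_pvBitsRaw n hn1, ← List.map_map, ← pvExpand_eq_allBits l]
    exact PySem.Set.ofList_eq_self_of_nodup _ ((pvExpand_nodup l).map ofList_injective)
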